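-- pv_equiv track=rewrite | github.com/rammie/advent-of-code | 2024/problem22.py | get_window_map
-- ===== SOURCE A (Python) =====
-- def get_window_map(sequence, changes, windows):
--     result = {}
--     for i in range(len(changes) - 3):
--         key = tuple(changes[i : i + 4])
--         assert len(key) == 4
--         if key not in result:
--             windows[key] = result[key] = sequence[i + 4]
--     return result
-- ===== SOURCE B (Python) =====
-- def get_window_map(sequence, changes, windows):
--     # Guard-free rewrite: materialise the key list once; a reverse pass of
--     # unconditional overwrites records each key's FIRST index (later writes,
--     # i.e. smaller i, win); then the dict is built in one comprehension keeping
--     # exactly the indices that ARE their key's first index -- no membership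
--     # test against the dict under construction.
--     # Mutates `windows` with the same bindings as A (same keys, same values).
--     keys = [tuple(changes[i : i + 4]) for i in range(len(changes) - 3)]
--     first = {}
--     for i in reversed(range(len(keys))):
--         first[keys[i]] = i
--     result = {k: sequence[i + 4] for i, k in enumerate(keys) if first[k] == i}
--     windows.update(result)
--     return result
-- ===== Notes on version B (the rewrite author's own statement) =====
-- stated objective: alternative
-- what changed: Replaced A's guarded first-write dict loop (membership test against the dict under construction) by a staged build: the key list is materialised once, a reverse pass of unconditional overwrites records each key's first index, and the result dict is built in one comprehension keeping exactly the indices that equal their key's first index.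
import Mathlib
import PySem

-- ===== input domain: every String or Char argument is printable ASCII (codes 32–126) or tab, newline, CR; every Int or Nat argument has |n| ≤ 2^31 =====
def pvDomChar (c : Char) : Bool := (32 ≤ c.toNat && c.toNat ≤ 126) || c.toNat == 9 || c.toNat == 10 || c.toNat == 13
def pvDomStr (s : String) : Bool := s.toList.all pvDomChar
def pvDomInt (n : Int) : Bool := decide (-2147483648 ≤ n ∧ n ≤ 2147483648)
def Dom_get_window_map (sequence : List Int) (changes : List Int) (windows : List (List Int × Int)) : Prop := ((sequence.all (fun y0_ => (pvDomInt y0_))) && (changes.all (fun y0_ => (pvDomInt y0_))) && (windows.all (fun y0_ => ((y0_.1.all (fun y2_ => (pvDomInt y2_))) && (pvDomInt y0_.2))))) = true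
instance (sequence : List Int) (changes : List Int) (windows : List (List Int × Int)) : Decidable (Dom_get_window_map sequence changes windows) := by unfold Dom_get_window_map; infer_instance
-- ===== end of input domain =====

-- B replaces A's guarded first-write dict loop by a staged build: the key list is materialised
-- once, a reverse pass of unconditional overwrites records each key's first index, and the dict
-- is built in one comprehension keeping exactly the indices that equal their key's first index —
-- no membership test against the dict being built.
-- Both Pythons mutate `windows` with the same bindings; `windows` is only written, never read, so
-- the claim (and the ports) concern the RETURN value, the `result` dict as its item list.

-- ===== PORT A =====
-- literal transliteration of A's loop; sequence[i+4] is in range under Pre_, so pyGetD 0 is exact there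
def get_window_map (sequence : List Int) (changes : List Int) (windows : List (List Int × Int)) : List (List Int × Int) :=
  ((PySem.List.pyRange 0 ((changes.length : Int) - 3) 1).foldl
    (fun (result : PySem.Dict (List Int) Int) i =>
      let key := PySem.List.slice changes (some i) (some (i + 4))
      if result.contains key = false then
        result.insert key (PySem.List.pyGetD sequence (i + 4) 0)
      else result)
    PySem.Dict.empty).items

-- ===== PORT B =====
def get_window_map_alt (sequence : List Int) (changes : List Int) (windows : List (List Int × Int)) : List (List Int × Int) :=
  let keys := (PySem.List.pyRange 0 ((changes.length : Int) - 3) 1).map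
    (fun i => PySem.List.slice changes (some i) (some (i + 4)))
  let first := ((PySem.List.pyRange 0 (keys.length : Int) 1).reverse).foldl
    (fun (d : PySem.Dict (List Int) Int) i => d.insert (PySem.List.pyGetD keys i []) i)
    PySem.Dict.empty
  (((PySem.List.enumerate keys 0).filter
      (fun p => first.getD p.2 0 == p.1)).foldl
    (fun (r : PySem.Dict (List Int) Int) p =>
      r.insert p.2 (PySem.List.pyGetD sequence (p.1 + 4) 0))
    PySem.Dict.empty).items

-- ===== PRECONDITION & SPEC =====
-- Pre_ is exactly A's no-raise condition: A raises IndexError iff some window whose first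
-- occurrence is at index i needs sequence[i+4] past the end of sequence (B raises on exactly
-- the same inputs); nothing on which A returns is excluded.
def Pre_get_window_map (sequence : List Int) (changes : List Int) (windows : List (List Int × Int)) : Prop :=
  ∀ i ∈ List.range (changes.length - 3),
    (∀ j ∈ List.range i, (changes.drop j).take 4 ≠ (changes.drop i).take 4) →
      i + 4 < sequence.length
instance (sequence : List Int) (changes : List Int) (windows : List (List Int × Int)) : Decidable (Pre_get_window_map sequence changes windows) := by unfold Pre_get_window_map; infer_instance

def pvWitness_get_window_map : List Int × List Int × (List (List Int × Int)) :=
  ([10, 12, 11, 13, 12, 14], [2, -1, 2, -1, 2], [])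

def Spec_get_window_map (sequence : List Int) (changes : List Int) (windows : List (List Int × Int)) (out : List (List Int × Int)) : Prop := out = get_window_map_alt sequence changes windows
instance (sequence : List Int) (changes : List Int) (windows : List (List Int × Int)) (out : List (List Int × Int)) : Decidable (Spec_get_window_map sequence changes windows out) := by unfold Spec_get_window_map; infer_instance

-- ===== CLAIM (what is proved, stated in full; the proofs are below) =====
def Claim_equal_get_window_map : Prop := ∀ (sequence : List Int) (changes : List Int) (windows : List (List Int × Int)), Dom_get_window_map sequence changes windows → Pre_get_window_map sequence changes windows → Spec_get_window_map sequence changes windows (get_window_map sequence changes windows)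

-- ===== LEMMAS AND PROOFS =====

-- enumerating a mapped range from its own start pairs each element with its index value
theorem pv_enum_range {κ : Type} (f : Int → κ) (m : Nat) :
    ∀ (a b : Int), (b - a).toNat = m →
      PySem.List.enumerate ((PySem.List.pyRange a b 1).map f) a
        = (PySem.List.pyRange a b 1).map (fun i => (i, f i)) := by
  induction m with
  | zero =>
    intro a b h
    rw [PySem.List.pyRange_one_eq_nil (by omega)]
    simp [PySem.List.enumerate_nil]
  | succ m ih =>
    intro a b h
    rw [PySem.List.pyRange_one_cons (by omega)]
    simp only [List.map_cons, PySem.List.enumerate_cons]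
    rw [ih (a + 1) b (by omega)]

-- A's guarded first-write fold over enumerated keys equals B's unconditional fold over the
-- prefix-filtered pairs; invariant: the accumulator contains exactly the keys already seen.
theorem pv_main {κ ν : Type} [BEq κ] [LawfulBEq κ] (g : Int → ν) (full : List κ) :
    ∀ (rest pref : List κ) (acc : PySem.Dict κ ν),
      full = pref ++ rest →
      (∀ k, acc.contains k = pref.contains k) →
      (PySem.List.enumerate rest (pref.length : Int)).foldl
        (fun r p => if r.contains p.2 = false then r.insert p.2 (g p.1) else r) acc
      = ((PySem.List.enumerate rest (pref.length : Int)).filter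
          (fun p => !((PySem.List.slice full none (some p.1)).contains p.2))).foldl
        (fun r p => r.insert p.2 (g p.1)) acc := by
  intro rest
  induction rest with
  | nil => intro pref acc _ _; simp [PySem.List.enumerate_nil]
  | cons x rest ih =>
    intro pref acc hfull hacc
    rw [PySem.List.enumerate_cons, List.foldl_cons, List.filter_cons]
    have hpre : PySem.List.slice full none (some (pref.length : Int)) = pref := by
      rw [PySem.List.slice_to_natCast, hfull, List.take_left]
    have hcast : (pref.length : Int) + 1 = ((pref ++ [x]).length : Int) := by
      simp
    have hfull' : full = (pref ++ [x]) ++ rest := by simp [hfull]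
    by_cases hc : pref.contains x = true
    · -- seen before: A skips, B filters the pair out
      rw [hpre]
      simp only [hacc x, hc, Bool.true_eq_false, if_false, Bool.not_true,
        Bool.false_eq_true]
      rw [hcast]
      refine ih (pref ++ [x]) acc hfull' (fun k => ?_)
      rw [hacc k]
      by_cases hk : x = k
      · subst hk; rw [List.contains_append, hc]; simp
      · simp
        exact fun h => absurd (Eq.symm h) hk
    · -- first occurrence: A inserts, B keeps the pair and inserts the same value
      have hc' : pref.contains x = false := by simpa using hc
      rw [hpre]
      simp only [hacc x, hc', Bool.not_false, if_true, List.foldl_cons]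
      rw [hcast]
      refine ih (pref ++ [x]) (acc.insert x (g (pref.length : Int))) hfull' (fun k => ?_)
      rw [PySem.Dict.contains_insert, hacc k]
      by_cases hk : k = x
      · subst hk; simp
      · simp [hk]

-- ===== VERDICT (by name: the statement is the Claim_ definition above) =====
-- A's fold over indices viewed as a fold over (index, key) pairs
theorem pv_foldl_pair {κ ν : Type} [BEq κ] (kf : Int → κ) (g : Int → ν) (l : List Int) :
    ∀ (acc : PySem.Dict κ ν),
      l.foldl (fun r i => if r.contains (kf i) = false then r.insert (kf i) (g i) else r) acc
      = (l.map (fun i => (i, kf i))).foldl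
          (fun r p => if r.contains p.2 = false then r.insert p.2 (g p.1) else r) acc := by
  induction l with
  | nil => intro acc; rfl
  | cons x l ih => intro acc; simp only [List.foldl_cons, List.map_cons, ih]

-- reverse-fold of unconditional inserts looked up = forward find? (later writes = earlier indices win)
theorem pv_revfold_get? {κ : Type} [BEq κ] [LawfulBEq κ] (kf : Int → κ) (k : κ) :
    ∀ (l : List Int),
      (l.reverse.foldl (fun (d : PySem.Dict κ Int) i => d.insert (kf i) i) PySem.Dict.empty).get? k
        = l.find? (fun i => kf i == k) := by
  intro l
  induction l with
  | nil => simp [PySem.Dict.get?_empty]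
  | cons x l ih =>
    rw [List.reverse_cons, List.foldl_append, List.foldl_cons, List.foldl_nil, List.find?_cons]
    cases hb : kf x == k with
    | true =>
      have he : kf x = k := eq_of_beq hb
      rw [he, PySem.Dict.get?_insert_self]
    | false =>
      have hne : k ≠ kf x := fun h => by rw [h, beq_self_eq_true] at hb; cases hb
      rw [PySem.Dict.get?_insert_of_ne _ _ hne, ih]

-- the first-index lookup agrees with the prefix-membership test at every in-range index
theorem pv_first_pred {κ : Type} [BEq κ] [LawfulBEq κ] (keys : List κ) (d0 : κ)
    (t : Nat) (h : t < keys.length) :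
    (((PySem.List.pyRange 0 (keys.length : Int) 1).find?
        (fun i => PySem.List.pyGetD keys i d0 == keys[t])).getD 0 == (t : Int))
      = !((keys.take t).contains keys[t]) := by
  rw [PySem.List.pyRange_one_append 0 (t : Int) (keys.length : Int) (by omega)
      (by exact_mod_cast h.le), List.find?_append]
  by_cases hmem : keys[t] ∈ keys.take t
  · obtain ⟨j, hj, hje⟩ := List.getElem_of_mem hmem
    have hjt : j < t := lt_of_lt_of_le hj (by simp [List.length_take])
    have hjl : j < keys.length := lt_trans hjt h
    rw [List.getElem_take] at hje
    have hfind : ((PySem.List.pyRange 0 (t : Int) 1).find?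
        (fun i => PySem.List.pyGetD keys i d0 == keys[t])).isSome := by
      rw [List.find?_isSome]
      refine ⟨(j : Int), PySem.List.mem_pyRange_one.mpr ⟨by omega, by exact_mod_cast hjt⟩, ?_⟩
      simp [PySem.List.pyGetD_natCast, List.getElem?_eq_getElem hjl, hje]
    obtain ⟨j0, hj0⟩ := Option.isSome_iff_exists.mp hfind
    have hj0lt : j0 < (t : Int) :=
      (PySem.List.mem_pyRange_one.mp (List.mem_of_find?_eq_some hj0)).2
    have hcontains : (keys.take t).contains keys[t] = true := by simpa using hmem
    rw [hj0, hcontains]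
    simp [beq_eq_false_iff_ne, Int.ne_of_lt hj0lt]
  · have hnone : (PySem.List.pyRange 0 (t : Int) 1).find?
        (fun i => PySem.List.pyGetD keys i d0 == keys[t]) = none := by
      rw [List.find?_eq_none]
      intro i hi
      obtain ⟨hi0, hit⟩ := PySem.List.mem_pyRange_one.mp hi
      intro hp
      have hjt : i.toNat < t := by omega
      have hjl : i.toNat < keys.length := lt_trans hjt h
      rw [PySem.List.pyGetD_of_nonneg _ _ hi0, List.getD_eq_getElem _ _ hjl] at hp
      have heq : keys[i.toNat] = keys[t] := eq_of_beq hp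
      have hlt : i.toNat < (List.take t keys).length := by
        rw [List.length_take]; omega
      have hgm : (List.take t keys)[i.toNat]'hlt ∈ List.take t keys := List.getElem_mem hlt
      rw [List.getElem_take] at hgm
      exact hmem (heq ▸ hgm)
    have hcons : PySem.List.pyRange (t : Int) (keys.length : Int) 1
        = (t : Int) :: PySem.List.pyRange ((t : Int) + 1) (keys.length : Int) 1 :=
      PySem.List.pyRange_one_cons (by exact_mod_cast h)
    have hcontains : (keys.take t).contains keys[t] = false := by simpa using hmem
    rw [hnone, hcons, List.find?_cons, hcontains]
    simp [PySem.List.pyGetD_natCast, List.getElem?_eq_getElem h]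

theorem get_window_map_spec : Claim_equal_get_window_map := by
  intro sequence changes windows _ _
  unfold Spec_get_window_map get_window_map get_window_map_alt
  apply congrArg PySem.Dict.items
  refine (pv_foldl_pair (fun i => PySem.List.slice changes (some i) (some (i + 4)))
    (fun i => PySem.List.pyGetD sequence (i + 4) 0)
    (PySem.List.pyRange 0 ((changes.length : Int) - 3) 1) PySem.Dict.empty).trans ?_
  rw [← pv_enum_range (fun i => PySem.List.slice changes (some i) (some (i + 4))) _ 0 _ rfl]
  refine (pv_main (fun i => PySem.List.pyGetD sequence (i + 4) 0)
    ((PySem.List.pyRange 0 ((changes.length : Int) - 3) 1).map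
      (fun i => PySem.List.slice changes (some i) (some (i + 4))))
    ((PySem.List.pyRange 0 ((changes.length : Int) - 3) 1).map
      (fun i => PySem.List.slice changes (some i) (some (i + 4))))
    [] PySem.Dict.empty rfl (fun k => by simp)).trans ?_
  set keys := (PySem.List.pyRange 0 ((changes.length : Int) - 3) 1).map
      (fun i => PySem.List.slice changes (some i) (some (i + 4))) with hkeys
  congr 1
  apply List.filter_congr
  intro p hp
  obtain ⟨tn, htn, hpe⟩ := (PySem.List.mem_enumerate_iff _ _ _).mp hp
  subst hpe
  simp only [List.length_nil, Nat.cast_zero, zero_add]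
  rw [PySem.List.slice_to_natCast, PySem.Dict.getD_eq_get?_getD,
    pv_revfold_get? (fun i => PySem.List.pyGetD keys i []) keys[tn]
      (PySem.List.pyRange 0 (keys.length : Int) 1),
    pv_first_pred keys [] tn htn]
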